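-- pv_equiv track=rewrite | github.com/thegeek-sys/uni | FP/ESAMS-GH/Eserciziario/sorting/3_solved/program.py | es3
-- ===== SOURCE A (Python) =====
-- def es3(ins1, ins2):
--     '''
--     progettare la funzione es3(ins1, ins2) che:
--     - riceve  in input due insiemi  di numeri naturali
--     - trova le terne (a,b,c) con a,b e c in insi1 con la proprieta' che a<b<c e a+b+c e' in insi2
--     - restituisce l'insieme di tutte le triple trovate.
--     Nella lista restituita le triple devono essere  rappresentate tramite tuple e le
--     varie tuple devono comparire nella lista per somma di componenti crescenti e in caso di parita'
--     in ordine lessicografico crescente.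
--     ESEMPIO:
--     se ins1={ 2,4,5,6,8,9} e ins2={5,15,19,25} la funzione restituisce la lista
--     [(2, 4, 9), (2, 5, 8), (4, 5, 6), (2, 8, 9), (4, 6, 9), (5, 6, 8)]
--     '''
--
--     ins1 = list(ins1)
--     rez = []
--     for i in range(len(ins1)):
--         for j in range(len(ins1)):
--             for p in range(len(ins1)):
--                 p = (ins1[i], ins1[j], ins1[p])
--                 if p[0]<p[1]<p[2] and sum(p) in ins2:
--                     rez.append(p)
--     return sorted(rez, key=lambda x: (sum(x), x))
-- ===== SOURCE B (Python) =====
-- def es3(ins1, ins2):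
--     lst = list(ins1)
--     cnt = {}
--     for x in lst:
--         cnt[x] = cnt.get(x, 0) + 1
--     targets = list(dict.fromkeys(ins2))
--     rez = []
--     for a in lst:
--         for b in lst:
--             if a < b:
--                 for t in targets:
--                     c = t - a - b
--                     if c > b:
--                         rez.extend([(a, b, c)] * cnt.get(c, 0))
--     return sorted(rez, key=lambda x: (sum(x), x))
-- ===== Notes on version B (the rewrite author's own statement) =====
-- stated objective: alternative
-- what changed: A scans all O(n^3) index triples of ins1 and tests each sum against ins2; B builds a count table of ins1 once, iterates only ordered pairs a<b and derives the third element c = t - a - b from each distinct target t, appending the triple with c's multiplicity, so the inner scan over ins1 disappears.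
import Mathlib
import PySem

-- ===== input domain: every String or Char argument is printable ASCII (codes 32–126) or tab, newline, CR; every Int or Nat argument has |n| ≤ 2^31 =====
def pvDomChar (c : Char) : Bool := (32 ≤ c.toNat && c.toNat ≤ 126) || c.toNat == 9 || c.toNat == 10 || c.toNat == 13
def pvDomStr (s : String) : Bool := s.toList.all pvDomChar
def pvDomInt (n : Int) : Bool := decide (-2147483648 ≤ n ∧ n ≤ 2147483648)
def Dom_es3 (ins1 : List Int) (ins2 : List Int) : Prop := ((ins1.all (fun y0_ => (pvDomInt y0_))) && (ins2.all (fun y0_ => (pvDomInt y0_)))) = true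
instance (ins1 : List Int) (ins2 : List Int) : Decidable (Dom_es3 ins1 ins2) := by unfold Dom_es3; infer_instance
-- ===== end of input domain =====

-- B replaces A's scan over all index triples by a pair loop that derives the third element
-- c = t - a - b from each distinct target sum t and multiplies by its occurrence count
-- (objective: alternative algorithm; a timing run did not confirm a >=1.5x speed-up).


-- ===== PORT A =====
def es3 (ins1 : List Int) (ins2 : List Int) : List (List Int) :=
  let ins1' := ins1          -- ins1 = list(ins1)
  let rez : List (List Int) :=
    (PySem.List.pyRange 0 (PySem.List.len ins1')).foldl (fun rez i =>
      (PySem.List.pyRange 0 (PySem.List.len ins1')).foldl (fun rez j =>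
        (PySem.List.pyRange 0 (PySem.List.len ins1')).foldl (fun rez p =>
          -- p = (ins1[i], ins1[j], ins1[p])
          let t : List Int := [PySem.List.pyGetD ins1' i 0, PySem.List.pyGetD ins1' j 0, PySem.List.pyGetD ins1' p 0]
          -- if p[0]<p[1]<p[2] and sum(p) in ins2: rez.append(p)
          if (PySem.List.pyGetD t 0 0 < PySem.List.pyGetD t 1 0 ∧
              PySem.List.pyGetD t 1 0 < PySem.List.pyGetD t 2 0) ∧ t.sum ∈ ins2
          then rez ++ [t] else rez) rez) rez) []
  -- return sorted(rez, key=lambda x: (sum(x), x))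
  PySem.List.sorted2 rez (fun x => x.sum) (fun x => x) false

-- ===== PORT B =====
def es3_alt (ins1 : List Int) (ins2 : List Int) : List (List Int) :=
  let lst := ins1
  -- cnt[x] = cnt.get(x, 0) + 1
  let cnt : PySem.Dict Int Int := lst.foldl (fun d x => d.insert x (d.getD x 0 + 1)) PySem.Dict.empty
  -- targets = list(dict.fromkeys(ins2))
  let targets := PySem.List.dedup ins2
  let rez : List (List Int) :=
    lst.foldl (fun rez a =>
      lst.foldl (fun rez b =>
        if a < b then
          targets.foldl (fun rez t =>
            let c := t - a - b
            -- rez.extend([(a, b, c)] * cnt.get(c, 0))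
            if c > b then rez ++ PySem.List.pyRepeat [[a, b, c]] (cnt.getD c 0) else rez) rez
        else rez) rez) []
  -- return sorted(rez, key=lambda x: (sum(x), x))
  PySem.List.sorted2 rez (fun x => x.sum) (fun x => x) false

-- ===== PRECONDITION & SPEC =====
def Spec_es3 (ins1 : List Int) (ins2 : List Int) (out : List (List Int)) : Prop := out = es3_alt ins1 ins2
instance (ins1 : List Int) (ins2 : List Int) (out : List (List Int)) : Decidable (Spec_es3 ins1 ins2 out) := by unfold Spec_es3; infer_instance

-- ===== CLAIM (what is proved, stated in full; the proofs are below) =====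
def Claim_equal_es3 : Prop := ∀ (ins1 : List Int) (ins2 : List Int), Dom_es3 ins1 ins2 → Spec_es3 ins1 ins2 (es3 ins1 ins2)

-- ===== LEMMAS AND PROOFS =====

-- 'for x: if p(x): out += g(x)' is one append of a flatMap over the filtered list
theorem pvFoldlIteAppend {α β : Type} (p : α → Prop) [DecidablePred p] (g : α → List β)
    (l : List α) (acc : List β) :
    l.foldl (fun acc x => if p x then acc ++ g x else acc) acc
      = acc ++ (l.filter (fun x => decide (p x))).flatMap g := by
  induction l generalizing acc with
  | nil => simp
  | cons x xs ih =>
    by_cases hx : p x <;> simp [hx, ih, List.append_assoc]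

-- a flatMap whose function is empty off p equals the flatMap over the filtered list
theorem pvFlatMapIte {α β : Type} (p : α → Prop) [DecidablePred p] (g : α → List β)
    (l : List α) :
    (l.flatMap fun x => if p x then g x else [])
      = (l.filter (fun x => decide (p x))).flatMap g := by
  induction l with
  | nil => rfl
  | cons x xs ih =>
    by_cases hx : p x <;> simp [hx, ih]

-- pointwise permutable blocks give permutable flatMaps
theorem pvPermFlatMap {α β : Type} {l : List α} {f g : α → List β}
    (h : ∀ x ∈ l, (f x).Perm (g x)) : (l.flatMap f).Perm (l.flatMap g) := by
  induction l with
  | nil => simp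
  | cons x xs ih =>
    simp only [List.flatMap_cons]
    exact (h x (List.mem_cons_self)).append (ih fun y hy => h y (List.mem_cons_of_mem _ hy))

-- summing 'if t = T then k else 0' over a duplicate-free list
theorem pvSumIte {ts : List Int} (hnd : ts.Nodup) (T : Int) (k : Nat) :
    (ts.map (fun t => if t = T then k else 0)).sum = if T ∈ ts then k else 0 := by
  induction ts with
  | nil => simp
  | cons t ts ih =>
    rcases List.nodup_cons.mp hnd with ⟨ht, hnd'⟩
    by_cases h : t = T
    · subst h
      simp [ht, ih hnd']
    · simp only [List.map_cons, List.sum_cons, if_neg h, List.mem_cons]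
      rw [ih hnd']
      by_cases hT : T ∈ ts <;> simp [hT, Ne.symm h]

-- the multiset of admissible third elements, grouped by the distinct target sums
theorem pvCorePerm (ins1 ins2 : List Int) (a b : Int) :
    (ins1.filter (fun c => decide (b < c) && decide ((a + b + c) ∈ ins2))).Perm
      ((PySem.List.dedup ins2).flatMap (fun t =>
        if b < t - a - b then List.replicate (ins1.count (t - a - b)) (t - a - b) else [])) := by
  rw [List.perm_iff_count]
  intro v
  rw [List.count_flatMap]
  by_cases hv : b < v ∧ (a + b + v) ∈ ins2
  · have hfil : List.count v (ins1.filter (fun c => decide (b < c) && decide ((a + b + c) ∈ ins2))) = ins1.count v := by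
      apply List.count_filter
      simp [hv.1, hv.2]
    rw [hfil]
    have hmap : (PySem.List.dedup ins2).map
        (List.count v ∘ fun t => if b < t - a - b then List.replicate (ins1.count (t - a - b)) (t - a - b) else [])
        = (PySem.List.dedup ins2).map (fun t => if t = a + b + v then ins1.count v else 0) := by
      apply List.map_congr_left
      intro t _
      by_cases ht : t = a + b + v
      · subst ht
        have hveq : a + b + v - a - b = v := by ring
        simp [hveq, hv.1]
      · have hne : t - a - b ≠ v := fun h => ht (by omega)
        by_cases hb : b < t - a - b <;> simp [hb, List.count_replicate, hne, ht]
    rw [hmap, pvSumIte (PySem.List.nodup_dedup ins2)]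
    simp [hv.2]
  · have hfil : List.count v (ins1.filter (fun c => decide (b < c) && decide ((a + b + c) ∈ ins2))) = 0 := by
      apply List.count_eq_zero_of_not_mem
      intro hmem
      rcases List.mem_filter.mp hmem with ⟨_, hc⟩
      simp only [Bool.and_eq_true, decide_eq_true_eq] at hc
      exact hv ⟨hc.1, hc.2⟩
    rw [hfil]
    symm
    simp only [List.sum_eq_zero_iff]
    intro n hn
    rcases List.mem_map.mp hn with ⟨t, htmem, hteq⟩
    by_cases hc : t - a - b = v
    · have hmem2 : a + b + v ∈ ins2 := by
        have : t = a + b + v := by omega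
        subst this
        exact (PySem.List.mem_dedup ins2 _).mp htmem
      have hnb : ¬ b < t - a - b := by
        intro hb
        exact hv ⟨by omega, hmem2⟩
      simp [hnb] at hteq
      omega
    · by_cases hb : b < t - a - b <;> simp [hb, List.count_replicate, hc] at hteq <;> omega

-- Python's tuple key (sum(x), x) as one lexicographic key
theorem pvKey : (fun (a b : List Int) => decide ((toLex (a.sum, a)) < toLex (b.sum, b)))
    = (fun (a b : List Int) => decide (a.sum < b.sum) || (!decide (b.sum < a.sum) && decide (a < b))) := by
  funext a b
  rcases lt_trichotomy a.sum b.sum with h1 | h1 | h1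
  · simp [Prod.Lex.lt_iff, h1]
  · simp [Prod.Lex.lt_iff, h1]
  · simp [Prod.Lex.lt_iff, not_lt_of_gt h1, h1, show a.sum ≠ b.sum by omega]

-- sorted(xs, key=lambda x:(sum(x), x)) depends only on the multiset of xs (the key is injective)
theorem pvSorted2Perm {xs ys : List (List Int)} (h : xs.Perm ys) :
    PySem.List.sorted2 xs (fun x => x.sum) (fun x => x) false
      = PySem.List.sorted2 ys (fun x => x.sum) (fun x => x) false := by
  have hb : ∀ (zs : List (List Int)),
      PySem.List.sorted2 zs (fun x => x.sum) (fun x => x) false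
        = PySem.List.sorted zs (fun x => toLex (x.sum, x)) false := by
    intro zs
    simp only [PySem.List.sorted2, PySem.List.sorted, Bool.false_eq_true, if_false]
    rw [pvKey]
  rw [hb, hb]
  exact PySem.List.sorted_eq_sorted_of_perm xs ys _ (by
    intro x y hxy
    have := congrArg (fun p => (ofLex p).2) hxy
    simpa using this) h

-- A's result, written as sorted-of-flatMap
theorem pvA_eq (ins1 ins2 : List Int) :
    es3 ins1 ins2 = PySem.List.sorted2
      (ins1.flatMap fun a => ins1.flatMap fun b =>
        (ins1.filter fun c => decide ((a < b ∧ b < c) ∧ a + (b + (c + 0)) ∈ ins2)).map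
          fun c => [a, b, c])
      (fun x => x.sum) (fun x => x) false := by
  have h3 : ∀ (rez : List (List Int)) (x y : Int),
      List.foldl (fun rez p =>
          if (x < y ∧ y < PySem.List.pyGetD ins1 p 0) ∧
              x + (y + (PySem.List.pyGetD ins1 p 0 + 0)) ∈ ins2
          then rez ++ [[x, y, PySem.List.pyGetD ins1 p 0]] else rez) rez
        (PySem.List.pyRange 0 (PySem.List.len ins1))
      = List.foldl (fun rez c =>
          if (x < y ∧ y < c) ∧ x + (y + (c + 0)) ∈ ins2 then rez ++ [[x, y, c]] else rez) rez ins1 := by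
    intro rez x y
    rw [PySem.List.foldl_pyRange_pyGetD ins1 0
      (fun rez c => if (x < y ∧ y < c) ∧ x + (y + (c + 0)) ∈ ins2 then rez ++ [[x, y, c]] else rez)
      rez (le_refl 0)]
    simp
  have h2 : ∀ (rez : List (List Int)) (x : Int),
      List.foldl (fun rez j =>
          List.foldl (fun rez c =>
            if (x < PySem.List.pyGetD ins1 j 0 ∧ PySem.List.pyGetD ins1 j 0 < c) ∧
                x + (PySem.List.pyGetD ins1 j 0 + (c + 0)) ∈ ins2
            then rez ++ [[x, PySem.List.pyGetD ins1 j 0, c]] else rez) rez ins1) rez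
        (PySem.List.pyRange 0 (PySem.List.len ins1))
      = List.foldl (fun rez b =>
          List.foldl (fun rez c =>
            if (x < b ∧ b < c) ∧ x + (b + (c + 0)) ∈ ins2 then rez ++ [[x, b, c]] else rez) rez ins1)
          rez ins1 := by
    intro rez x
    rw [PySem.List.foldl_pyRange_pyGetD ins1 0
      (fun rez b => List.foldl (fun rez c =>
        if (x < b ∧ b < c) ∧ x + (b + (c + 0)) ∈ ins2 then rez ++ [[x, b, c]] else rez) rez ins1)
      rez (le_refl 0)]
    simp
  have h1 :
      List.foldl (fun rez i =>
          List.foldl (fun rez b =>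
            List.foldl (fun rez c =>
              if (PySem.List.pyGetD ins1 i 0 < b ∧ b < c) ∧
                  PySem.List.pyGetD ins1 i 0 + (b + (c + 0)) ∈ ins2
              then rez ++ [[PySem.List.pyGetD ins1 i 0, b, c]] else rez) rez ins1) rez ins1)
        ([] : List (List Int)) (PySem.List.pyRange 0 (PySem.List.len ins1))
      = List.foldl (fun rez a =>
          List.foldl (fun rez b =>
            List.foldl (fun rez c =>
              if (a < b ∧ b < c) ∧ a + (b + (c + 0)) ∈ ins2 then rez ++ [[a, b, c]] else rez) rez ins1) rez ins1)
          [] ins1 := by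
    rw [PySem.List.foldl_pyRange_pyGetD ins1 0
      (fun rez a => List.foldl (fun rez b =>
        List.foldl (fun rez c =>
          if (a < b ∧ b < c) ∧ a + (b + (c + 0)) ∈ ins2 then rez ++ [[a, b, c]] else rez) rez ins1) rez ins1)
      [] (le_refl 0)]
    simp
  simp only [es3, PySem.List.pyGetD_ofNat', List.getD_cons_zero, List.getD_cons_succ,
    List.sum_cons, List.sum_nil]
  simp only [h3]
  simp only [h2]
  simp only [h1]
  simp only [PySem.List.foldl_append_ite, PySem.List.foldl_append_eq_flatMap,
    List.nil_append]

-- B's result, written as sorted-of-flatMap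
theorem pvB_eq (ins1 ins2 : List Int) :
    es3_alt ins1 ins2 = PySem.List.sorted2
      (ins1.flatMap fun a =>
        (ins1.filter fun b => decide (a < b)).flatMap fun b =>
          ((PySem.List.dedup ins2).filter fun t => decide (t - a - b > b)).flatMap fun t =>
            List.replicate (ins1.count (t - a - b)) [a, b, t - a - b])
      (fun x => x.sum) (fun x => x) false := by
  simp only [es3_alt, PySem.Dict.getD_foldl_insert_add_one, PySem.Dict.getD_empty,
    PySem.List.pyRepeat_singleton, zero_add, Int.toNat_natCast]
  simp only [pvFoldlIteAppend]
  simp only [PySem.List.foldl_append_eq_flatMap, List.nil_append]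

-- the two collected lists are permutations of each other
theorem pvRezPerm (ins1 ins2 : List Int) :
    (ins1.flatMap fun a => ins1.flatMap fun b =>
        (ins1.filter fun c => decide ((a < b ∧ b < c) ∧ a + (b + (c + 0)) ∈ ins2)).map
          fun c => [a, b, c]).Perm
      (ins1.flatMap fun a =>
        (ins1.filter fun b => decide (a < b)).flatMap fun b =>
          ((PySem.List.dedup ins2).filter fun t => decide (t - a - b > b)).flatMap fun t =>
            List.replicate (ins1.count (t - a - b)) [a, b, t - a - b]) := by
  apply pvPermFlatMap
  intro a _
  have hsplit : (fun b => (ins1.filter fun c =>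
        decide ((a < b ∧ b < c) ∧ a + (b + (c + 0)) ∈ ins2)).map (fun c => [a, b, c]))
      = fun b => if a < b then
          ((ins1.filter fun c => decide (b < c) && decide ((a + b + c) ∈ ins2)).map
            (fun c => [a, b, c])) else [] := by
    funext b
    by_cases hab : a < b
    · rw [if_pos hab]
      congr 1
      apply List.filter_congr
      intro c _
      have h0 : a + (b + (c + 0)) = a + b + c := by ring
      rw [h0]
      simp [hab]
    · rw [if_neg hab]
      rw [List.filter_eq_nil_iff.mpr (by intro c _; simp [hab])]
      simp
  rw [hsplit, pvFlatMapIte]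
  apply pvPermFlatMap
  intro b _
  have hR : ((PySem.List.dedup ins2).filter fun t => decide (t - a - b > b)).flatMap
        (fun t => List.replicate (ins1.count (t - a - b)) [a, b, t - a - b])
      = ((PySem.List.dedup ins2).flatMap (fun t =>
          if b < t - a - b then List.replicate (ins1.count (t - a - b)) (t - a - b) else [])).map
        (fun c => [a, b, c]) := by
    rw [List.map_flatMap]
    simp only [gt_iff_lt]
    rw [← pvFlatMapIte (fun t => b < t - a - b)
      (fun t => List.replicate (ins1.count (t - a - b)) [a, b, t - a - b])]
    congr 1
    funext t
    by_cases hb : b < t - a - b <;> simp [hb, List.map_replicate]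
  rw [hR]
  exact (pvCorePerm ins1 ins2 a b).map _

-- ===== VERDICT (by name: the statement is the Claim_ definition above) =====
theorem es3_spec : Claim_equal_es3 := by
  intro ins1 ins2 _
  show es3 ins1 ins2 = es3_alt ins1 ins2
  rw [pvA_eq, pvB_eq]
  exact pvSorted2Perm (pvRezPerm ins1 ins2)
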